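-- pv_equiv track=rewrite | github.com/currawong-project/libcw | py/tracer.py | time_diff
-- ===== SOURCE A (Python) =====
-- NANO_PER_SEC = 1000000000
--
-- def time_diff( t0, t1 ):
--
--     s0,ns0 = t0
--     s1,ns1 = t1
--
--     if s0 == s1:
--         return 0,ns1 - ns0
--
--     d0 = NANO_PER_SEC - ns0
--
--     dn = d0 + ns1
--     ds = (s1-s0) - 1
--
--     while dn > NANO_PER_SEC:
--         dn -= NANO_PER_SEC
--         ds += 1
--
--     return (ds,dn)
-- ===== SOURCE B (Python) =====
-- NANO_PER_SEC = 1000000000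
--
-- def time_diff(t0, t1):
--     s0, ns0 = t0
--     s1, ns1 = t1
--     if s0 == s1:
--         return 0, ns1 - ns0
--     dn = NANO_PER_SEC - ns0 + ns1
--     if dn <= NANO_PER_SEC:
--         return s1 - s0 - 1, dn
--     q, r = divmod(dn - 1, NANO_PER_SEC)
--     return s1 - s0 - 1 + q, r + 1
-- ===== Notes on version B (the rewrite author's own statement) =====
-- stated objective: simpler
-- what changed: The carry loop that repeatedly subtracts NANO_PER_SEC is replaced by a single divmod closed form (offset by -1/+1 so the remainder lands in (0, NANO_PER_SEC] exactly as the loop leaves it); when no carry is needed the sum is returned directly.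
import Mathlib
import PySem

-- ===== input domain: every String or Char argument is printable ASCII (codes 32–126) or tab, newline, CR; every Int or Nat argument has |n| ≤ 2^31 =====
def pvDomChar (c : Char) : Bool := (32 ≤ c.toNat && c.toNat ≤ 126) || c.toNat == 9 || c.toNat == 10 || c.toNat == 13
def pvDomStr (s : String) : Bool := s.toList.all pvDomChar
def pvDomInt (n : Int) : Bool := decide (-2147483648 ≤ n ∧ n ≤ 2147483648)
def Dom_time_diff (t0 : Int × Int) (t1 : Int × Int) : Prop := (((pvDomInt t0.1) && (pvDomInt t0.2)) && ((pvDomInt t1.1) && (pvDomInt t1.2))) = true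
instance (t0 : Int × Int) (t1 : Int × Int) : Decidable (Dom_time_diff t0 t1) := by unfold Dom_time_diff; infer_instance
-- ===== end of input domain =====

-- B replaces A's carry-subtraction while-loop by a single divmod closed form (objective: simpler).

-- ===== PORT A =====
-- the 'while dn > NANO_PER_SEC: dn -= NANO_PER_SEC; ds += 1' loop of A
def timeDiffLoop (ds dn : Int) : Int × Int :=
  if h : dn > 1000000000 then timeDiffLoop (ds + 1) (dn - 1000000000)
  else (ds, dn)
termination_by dn.toNat
decreasing_by omega

def time_diff (t0 : Int × Int) (t1 : Int × Int) : Int × Int :=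
  let s0 := t0.1
  let ns0 := t0.2
  let s1 := t1.1
  let ns1 := t1.2
  if s0 == s1 then (0, ns1 - ns0)
  else
    let d0 : Int := 1000000000 - ns0
    let dn := d0 + ns1
    let ds := (s1 - s0) - 1
    timeDiffLoop ds dn

-- ===== PORT B =====
def time_diff_alt (t0 : Int × Int) (t1 : Int × Int) : Int × Int :=
  let s0 := t0.1
  let ns0 := t0.2
  let s1 := t1.1
  let ns1 := t1.2
  if s0 == s1 then (0, ns1 - ns0)
  else
    let dn : Int := 1000000000 - ns0 + ns1
    if dn ≤ 1000000000 then (s1 - s0 - 1, dn)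
    else
      let q := PySem.Int.floordiv (dn - 1) 1000000000
      let r := PySem.Int.mod (dn - 1) 1000000000
      (s1 - s0 - 1 + q, r + 1)

-- ===== PRECONDITION & SPEC =====
def Spec_time_diff (t0 : Int × Int) (t1 : Int × Int) (out : Int × Int) : Prop := out = time_diff_alt t0 t1
instance (t0 : Int × Int) (t1 : Int × Int) (out : Int × Int) : Decidable (Spec_time_diff t0 t1 out) := by unfold Spec_time_diff; infer_instance

-- ===== CLAIM (what is proved, stated in full; the proofs are below) =====
def Claim_equal_time_diff : Prop := ∀ (t0 : Int × Int) (t1 : Int × Int), Dom_time_diff t0 t1 → Spec_time_diff t0 t1 (time_diff t0 t1)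

-- ===== LEMMAS AND PROOFS =====

-- closed form of A's carry loop
theorem timeDiffLoop_closed (ds dn : Int) :
    timeDiffLoop ds dn =
      if dn ≤ 1000000000 then (ds, dn)
      else (ds + PySem.Int.floordiv (dn - 1) 1000000000,
            PySem.Int.mod (dn - 1) 1000000000 + 1) := by
  induction ds, dn using timeDiffLoop.induct with
  | case1 ds dn h ih =>
      rw [timeDiffLoop, dif_pos h, ih]
      have hN : (0:Int) < 1000000000 := by norm_num
      rw [PySem.Int.floordiv_eq_ediv_of_pos hN, PySem.Int.mod_eq_emod_of_pos hN,
          PySem.Int.floordiv_eq_ediv_of_pos hN, PySem.Int.mod_eq_emod_of_pos hN]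
      by_cases h1 : dn - 1000000000 ≤ 1000000000
      · rw [if_pos h1, if_neg (by omega)]
        have hq : (dn - 1) / 1000000000 = 1 := by omega
        have hr : (dn - 1) % 1000000000 = dn - 1 - 1000000000 := by omega
        rw [hq, hr]
        simp only [Prod.mk.injEq, true_and]
        omega
      · rw [if_neg h1, if_neg (by omega)]
        have hq : (dn - 1000000000 - 1) / 1000000000 = (dn - 1) / 1000000000 - 1 := by
          omega
        have hr : (dn - 1000000000 - 1) % 1000000000 = (dn - 1) % 1000000000 := by
          omega
        rw [hq, hr]
        simp only [Prod.mk.injEq, and_true]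
        omega
  | case2 ds dn h =>
      rw [timeDiffLoop, dif_neg h, if_pos (by omega)]

-- ===== VERDICT (by name: the statement is the Claim_ definition above) =====
theorem time_diff_spec : Claim_equal_time_diff := by
  intro t0 t1 _
  unfold Spec_time_diff time_diff time_diff_alt
  by_cases hs : t0.1 == t1.1
  · simp [hs]
  · simp only [hs, Bool.false_eq_true, if_false]
    rw [timeDiffLoop_closed]
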